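-- pv_equiv track=rewrite | github.com/sanjanakotha/AD_variant_analysis | AD_variant_analysis/classify_snvs.py | build_genomic_to_cds_mapping
-- ===== SOURCE A (Python) =====
-- from typing import Dict, List, Optional, Tuple
--
-- def build_genomic_to_cds_mapping(coords: List[Tuple[int, int]], strand: str,
--                                  nt_seq: str) -> Tuple[Dict[int, str], Dict[int, List[int]]]:
--     """
--     Build mapping from genomic coordinates to CDS positions and codons.
--
--     Args:
--         coords: List of (start, end) exon coordinates
--         strand: Strand orientation
--         nt_seq: Nucleotide sequence of CDS
--
--     Returns:
--         Tuple of (pos_to_nt dict, aa_to_codon dict)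
--     """
--     # Build list of all genomic positions in CDS order
--     total_coords = []
--     for start, end in coords:
--         if strand in ["-", "-1", -1]:
--             total_coords += list(range(end, start - 1, -1))
--         else:
--             total_coords += list(range(start, end + 1))
--
--     # Map genomic position to nucleotide
--     pos_to_nt = {}
--     for i, coord in enumerate(total_coords):
--         if i >= len(nt_seq):
--             raise ValueError(
--                 f"Coordinate mismatch: position {i} exceeds sequence length {len(nt_seq)}"
--             )
--         pos_to_nt[coord] = nt_seq[i]
--
--     # Map amino acid position to codon coordinates
--     aa_to_codon = {}
--     for i in range(len(total_coords) // 3):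
--         start_idx = i * 3
--         aa_to_codon[i + 1] = total_coords[start_idx:start_idx + 3]
--
--     return pos_to_nt, aa_to_codon
-- ===== SOURCE B (Python) =====
-- def build_genomic_to_cds_mapping(coords, strand, nt_seq):
--     """Single fused walk over the exon ranges maintaining a running index,
--     a codon buffer and an amino-acid counter (replaces A's three passes)."""
--     reverse = strand in ["-", "-1", -1]
--     pos_to_nt = {}
--     aa_to_codon = {}
--     i = 0
--     buf = []
--     aa = 1
--     for start, end in coords:
--         rng = range(end, start - 1, -1) if reverse else range(start, end + 1)
--         for coord in rng:
--             if i >= len(nt_seq):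
--                 raise ValueError(
--                     f"Coordinate mismatch: position {i} exceeds sequence length {len(nt_seq)}"
--                 )
--             pos_to_nt[coord] = nt_seq[i]
--             i += 1
--             buf.append(coord)
--             if len(buf) == 3:
--                 aa_to_codon[aa] = buf
--                 aa += 1
--                 buf = []
--     return pos_to_nt, aa_to_codon
-- ===== Notes on version B (the rewrite author's own statement) =====
-- stated objective: alternative
-- what changed: Replaces A's three separate passes (materialize the full total_coords list, an enumerate pass mapping positions to nucleotides, a slicing pass over index ranges building codons) with one fused walk over the exon ranges that maintains a running sequence index, a 3-element codon buffer and an amino-acid counter, never materializing total_coords.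
import Mathlib
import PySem

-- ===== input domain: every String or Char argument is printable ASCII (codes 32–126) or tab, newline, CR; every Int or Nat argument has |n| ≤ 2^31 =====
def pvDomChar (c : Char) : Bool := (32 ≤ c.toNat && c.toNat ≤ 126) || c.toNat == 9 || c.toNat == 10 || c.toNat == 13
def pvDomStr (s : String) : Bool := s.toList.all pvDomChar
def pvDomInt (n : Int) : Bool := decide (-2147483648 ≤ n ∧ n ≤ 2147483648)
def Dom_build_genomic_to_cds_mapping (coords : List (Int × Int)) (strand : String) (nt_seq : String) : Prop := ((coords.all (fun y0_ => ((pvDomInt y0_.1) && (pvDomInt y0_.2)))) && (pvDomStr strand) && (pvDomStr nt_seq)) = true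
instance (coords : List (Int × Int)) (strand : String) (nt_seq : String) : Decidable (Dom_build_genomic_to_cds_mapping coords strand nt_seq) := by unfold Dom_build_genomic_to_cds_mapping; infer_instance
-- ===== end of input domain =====

-- B fuses A's three passes into one walk over the exon ranges with a running index,
-- codon buffer and amino-acid counter; objective: alternative decomposition (same cost).
-- Where A raises ValueError (more genomic positions than nucleotides) B raises the same
-- error; those inputs are outside Pre_.

-- ===== PORT A =====
def build_genomic_to_cds_mapping (coords : List (Int × Int)) (strand : String) (nt_seq : String) : (List (Int × String)) × (List (Int × List Int)) :=
  -- pass 1: all genomic positions in CDS order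
  let total_coords : List Int := coords.foldl (fun acc p =>
    acc ++ (if strand = "-" ∨ strand = "-1" then PySem.List.pyRange p.2 (p.1 - 1) (-1)
            else PySem.List.pyRange p.1 (p.2 + 1) 1)) []
  let nt : List Char := nt_seq.toList
  -- pass 2: genomic position -> nucleotide (Python raises ValueError when i >= len(nt_seq); outside Pre_)
  let pos_to_nt : PySem.Dict Int String :=
    (PySem.List.enumerate total_coords).foldl (fun d ic =>
      match PySem.List.pyGet? nt ic.1 with
      | some c => d.insert ic.2 (String.ofList [c])
      | none => d) PySem.Dict.empty
  -- pass 3: amino-acid position -> codon coordinates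
  let aa_to_codon : PySem.Dict Int (List Int) :=
    (PySem.List.pyRange 0 (PySem.Int.floordiv (total_coords.length : Int) 3) 1).foldl (fun d i =>
      d.insert (i + 1) (PySem.List.slice total_coords (some (i * 3)) (some (i * 3 + 3)))) PySem.Dict.empty
  (pos_to_nt.items, aa_to_codon.items)

-- ===== PORT B =====
-- inner loop of Source B: one genomic coordinate at a time, carrying (pos_to_nt, aa_to_codon, i, buf, aa)
def bgcGo (nt : List Char) : List Int → PySem.Dict Int String → PySem.Dict Int (List Int) → Int → List Int → Int → PySem.Dict Int String × PySem.Dict Int (List Int) × Int × List Int × Int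
  | [], d, a, i, buf, aa => (d, a, i, buf, aa)
  | c :: cs, d, a, i, buf, aa =>
    match PySem.List.pyGet? nt i with
    | none => (d, a, i, buf, aa)   -- Python raises ValueError here; outside Pre_
    | some ch =>
      let d' := d.insert c (String.ofList [ch])
      let buf' := buf ++ [c]
      if buf'.length = 3 then bgcGo nt cs d' (a.insert aa buf') (i + 1) [] (aa + 1)
      else bgcGo nt cs d' a (i + 1) buf' aa

-- outer loop of Source B over the exons
def bgcOuter (nt : List Char) (reverse : Bool) : List (Int × Int) → PySem.Dict Int String → PySem.Dict Int (List Int) → Int → List Int → Int → PySem.Dict Int String × PySem.Dict Int (List Int) × Int × List Int × Int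
  | [], d, a, i, buf, aa => (d, a, i, buf, aa)
  | p :: ps, d, a, i, buf, aa =>
    let rng := if reverse then PySem.List.pyRange p.2 (p.1 - 1) (-1)
               else PySem.List.pyRange p.1 (p.2 + 1) 1
    let st := bgcGo nt rng d a i buf aa
    bgcOuter nt reverse ps st.1 st.2.1 st.2.2.1 st.2.2.2.1 st.2.2.2.2

def build_genomic_to_cds_mapping_alt (coords : List (Int × Int)) (strand : String) (nt_seq : String) : (List (Int × String)) × (List (Int × List Int)) :=
  let reverse : Bool := strand == "-" || strand == "-1"
  let st := bgcOuter nt_seq.toList reverse coords PySem.Dict.empty PySem.Dict.empty 0 [] 1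
  (st.1.items, st.2.1.items)

-- ===== PRECONDITION & SPEC =====
-- Pre_ excludes exactly the inputs on which A raises ValueError: when the total number of
-- genomic positions in the exon ranges exceeds the length of nt_seq (B raises the same error there).
def Pre_build_genomic_to_cds_mapping (coords : List (Int × Int)) (strand : String) (nt_seq : String) : Prop :=
  (coords.map (fun p => (p.2 - p.1 + 1).toNat)).sum ≤ nt_seq.toList.length
instance (coords : List (Int × Int)) (strand : String) (nt_seq : String) : Decidable (Pre_build_genomic_to_cds_mapping coords strand nt_seq) := by unfold Pre_build_genomic_to_cds_mapping; infer_instance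
def pvWitness_build_genomic_to_cds_mapping : (List (Int × Int)) × String × String := ([(1, 3), (10, 11)], "+", "ACGTT")

def Spec_build_genomic_to_cds_mapping (coords : List (Int × Int)) (strand : String) (nt_seq : String) (out : (List (Int × String)) × (List (Int × List Int))) : Prop := out = build_genomic_to_cds_mapping_alt coords strand nt_seq
instance (coords : List (Int × Int)) (strand : String) (nt_seq : String) (out : (List (Int × String)) × (List (Int × List Int))) : Decidable (Spec_build_genomic_to_cds_mapping coords strand nt_seq out) := by unfold Spec_build_genomic_to_cds_mapping; infer_instance

-- ===== CLAIM (what is proved, stated in full; the proofs are below) =====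
def Claim_equal_build_genomic_to_cds_mapping : Prop := ∀ (coords : List (Int × Int)) (strand : String) (nt_seq : String), Dom_build_genomic_to_cds_mapping coords strand nt_seq → Pre_build_genomic_to_cds_mapping coords strand nt_seq → Spec_build_genomic_to_cds_mapping coords strand nt_seq (build_genomic_to_cds_mapping coords strand nt_seq)

-- ===== LEMMAS AND PROOFS =====

-- proof-side restatement of A's pass 2 with a general starting index
def posF (nt : List Char) (d : PySem.Dict Int String) (s : Int) (cs : List Int) : PySem.Dict Int String :=
  (PySem.List.enumerate cs s).foldl (fun d ic =>
    match PySem.List.pyGet? nt ic.1 with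
    | some c => d.insert ic.2 (String.ofList [c])
    | none => d) d

-- proof-side codon accumulator: (aa_to_codon, buf, aa) after consuming cs
def codAcc (a : PySem.Dict Int (List Int)) (aa : Int) (buf : List Int) : List Int → PySem.Dict Int (List Int) × List Int × Int
  | [] => (a, buf, aa)
  | c :: cs =>
    let buf' := buf ++ [c]
    if buf'.length = 3 then codAcc (a.insert aa buf') (aa + 1) [] cs
    else codAcc a aa buf' cs


-- codAcc on a full codon with an empty buffer: three steps of the buffer
theorem codAcc_three (a : PySem.Dict Int (List Int)) (aa x y z : Int) (r : List Int) :
    codAcc a aa [] (x :: y :: z :: r) = codAcc (a.insert aa [x, y, z]) (aa + 1) [] r := by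
  simp [codAcc]

-- the inner loop is inert once the index is out of range (Python has raised)
theorem bgcGo_stuck (nt : List Char) (cs : List Int) (d : PySem.Dict Int String)
    (a : PySem.Dict Int (List Int)) (i : Int) (buf : List Int) (aa : Int)
    (h : PySem.List.pyGet? nt i = none) :
    bgcGo nt cs d a i buf aa = (d, a, i, buf, aa) := by
  cases cs with
  | nil => rfl
  | cons c cs => simp [bgcGo, h]

theorem bgcGo_append (nt : List Char) (xs ys : List Int) (d : PySem.Dict Int String)
    (a : PySem.Dict Int (List Int)) (i : Int) (buf : List Int) (aa : Int) :
    bgcGo nt (xs ++ ys) d a i buf aa =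
      (fun st : PySem.Dict Int String × PySem.Dict Int (List Int) × Int × List Int × Int =>
        bgcGo nt ys st.1 st.2.1 st.2.2.1 st.2.2.2.1 st.2.2.2.2) (bgcGo nt xs d a i buf aa) := by
  induction xs generalizing d a i buf aa with
  | nil => rfl
  | cons c xs ih =>
    simp only [List.cons_append, bgcGo]
    cases h : PySem.List.pyGet? nt i with
    | none => simp [bgcGo_stuck nt ys _ _ _ _ _ h]
    | some ch => split_ifs <;> apply ih

-- the outer loop is the inner loop over the flattened exon ranges
theorem bgcOuter_eq (nt : List Char) (rev : Bool) (ps : List (Int × Int))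
    (d : PySem.Dict Int String) (a : PySem.Dict Int (List Int)) (i : Int) (buf : List Int) (aa : Int) :
    bgcOuter nt rev ps d a i buf aa =
      bgcGo nt (ps.flatMap (fun p => if rev then PySem.List.pyRange p.2 (p.1 - 1) (-1)
                                     else PySem.List.pyRange p.1 (p.2 + 1) 1)) d a i buf aa := by
  induction ps generalizing d a i buf aa with
  | nil => rfl
  | cons p ps ih =>
    simp only [bgcOuter, List.flatMap_cons]
    rw [bgcGo_append, ih]

-- main invariant: within Pre_, the fused loop computes A's two passes
theorem bgcGo_spec (nt : List Char) (cs : List Int) (d : PySem.Dict Int String)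
    (a : PySem.Dict Int (List Int)) (i : Int) (buf : List Int) (aa : Int)
    (h0 : 0 ≤ i) (h1 : i + (cs.length : Int) ≤ (nt.length : Int)) :
    bgcGo nt cs d a i buf aa =
      (posF nt d i cs, (codAcc a aa buf cs).1, i + (cs.length : Int),
       (codAcc a aa buf cs).2.1, (codAcc a aa buf cs).2.2) := by
  induction cs generalizing d a i buf aa with
  | nil => simp [bgcGo, posF, codAcc, PySem.List.enumerate_nil]
  | cons c cs ih =>
    have hi : i.toNat < nt.length := by
      simp only [List.length_cons] at h1; push_cast at h1; omega
    have hsome : PySem.List.pyGet? nt i = some nt[i.toNat] :=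
      PySem.List.pyGet?_eq_some_getElem nt h0 (by omega)
    have hbnd : i + 1 + (cs.length : Int) ≤ (nt.length : Int) := by
      simp only [List.length_cons] at h1; push_cast at h1; omega
    simp only [bgcGo, hsome, posF, PySem.List.enumerate_cons, List.foldl_cons, codAcc]
    split_ifs with hb <;>
    · rw [ih _ _ _ _ _ (by omega) hbnd]
      simp only [posF, List.length_cons]
      push_cast
      ring_nf


-- A's pass 3, rephrased over List.range, equals the codon accumulator
theorem aaFold_eq (n : Nat) : ∀ (cs : List Int) (a : PySem.Dict Int (List Int)) (aa : Int),
    cs.length / 3 = n →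
    (List.range n).foldl
      (fun d k => d.insert (aa + (k : Int))
        (PySem.List.slice cs (some ((k : Int) * 3)) (some ((k : Int) * 3 + 3)))) a
    = (codAcc a aa [] cs).1 := by
  induction n with
  | zero =>
    intro cs a aa h
    match cs with
    | [] => rfl
    | [x] => simp [codAcc]
    | [x, y] => simp [codAcc]
    | x :: y :: z :: r => simp at h; omega
  | succ n ih =>
    intro cs a aa h
    match cs with
    | [] => simp at h
    | [x] => simp at h
    | [x, y] => simp at h
    | x :: y :: z :: r =>
      have hr : r.length / 3 = n := by simp at h; omega
      rw [List.range_succ_eq_map, List.foldl_cons, List.foldl_map]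
      have hshift : ∀ k : Nat,
          PySem.List.slice (x :: y :: z :: r) (some (((k : Int) + 1) * 3)) (some (((k : Int) + 1) * 3 + 3))
            = PySem.List.slice r (some ((k : Int) * 3)) (some ((k : Int) * 3 + 3)) := by
        intro k
        rw [PySem.List.slice_toNat _ (by positivity) (by positivity),
            PySem.List.slice_toNat _ (by positivity) (by positivity)]
        have h1 : (((k : Int) + 1) * 3).toNat = 3 * k + 3 := by omega
        have h2 : (((k : Int) + 1) * 3 + 3).toNat = 3 * k + 6 := by omega
        have h3 : ((k : Int) * 3).toNat = 3 * k := by omega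
        have h4 : ((k : Int) * 3 + 3).toNat = 3 * k + 3 := by omega
        rw [h1, h2, h3, h4]
        simp [List.drop_succ_cons]
      have hbody : (fun (d : PySem.Dict Int (List Int)) (k : Nat) =>
            d.insert (aa + ((k + 1 : Nat) : Int))
              (PySem.List.slice (x :: y :: z :: r) (some (((k + 1 : Nat) : Int) * 3))
                (some (((k + 1 : Nat) : Int) * 3 + 3))))
          = (fun (d : PySem.Dict Int (List Int)) (k : Nat) =>
            d.insert ((aa + 1) + (k : Int))
              (PySem.List.slice r (some ((k : Int) * 3)) (some ((k : Int) * 3 + 3)))) := by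
        funext d k
        push_cast
        rw [hshift k]
        ring_nf
      simp only [Nat.cast_zero]
      rw [show (fun (d : PySem.Dict Int (List Int)) (k : Nat) =>
            d.insert (aa + ((k.succ : Nat) : Int))
              (PySem.List.slice (x :: y :: z :: r) (some (((k.succ : Nat) : Int) * 3))
                (some (((k.succ : Nat) : Int) * 3 + 3)))) =
          (fun (d : PySem.Dict Int (List Int)) (k : Nat) =>
            d.insert ((aa + 1) + (k : Int))
              (PySem.List.slice r (some ((k : Int) * 3)) (some ((k : Int) * 3 + 3)))) from hbody]
      rw [ih r _ (aa + 1) hr, codAcc_three]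
      ring_nf
      have hs : PySem.List.slice (x :: y :: z :: r) (some (0 : Int)) (some 3) = [x, y, z] := by
        rw [PySem.List.slice_toNat _ le_rfl (by norm_num)]
        rfl
      rw [hs]

theorem foldl_append_flat {A B : Type} (f : A → List B) (l : List A) (init : List B) :
    l.foldl (fun acc x => acc ++ f x) init = init ++ l.flatMap f := by
  induction l generalizing init with
  | nil => simp
  | cons x l ih => simp [ih]

-- A's pass 3 as written (pyRange over the floordiv) equals the codon accumulator
theorem aaA_eq (cs : List Int) :
    (PySem.List.pyRange 0 (PySem.Int.floordiv (cs.length : Int) 3) 1).foldl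
      (fun d i => d.insert (i + 1) (PySem.List.slice cs (some (i * 3)) (some (i * 3 + 3))))
      PySem.Dict.empty
    = (codAcc PySem.Dict.empty 1 [] cs).1 := by
  have hfd : PySem.Int.floordiv (cs.length : Int) 3 = ((cs.length / 3 : Nat) : Int) := by
    simp [PySem.Int.floordiv, Int.fdiv_eq_ediv]
  rw [hfd, PySem.List.pyRange_one, List.foldl_map]
  have hn : (((cs.length / 3 : Nat) : Int) - 0).toNat = cs.length / 3 := by omega
  rw [hn]
  have hbody : (fun (d : PySem.Dict Int (List Int)) (k : Nat) =>
        d.insert ((0 + (k : Int)) + 1)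
          (PySem.List.slice cs (some ((0 + (k : Int)) * 3)) (some ((0 + (k : Int)) * 3 + 3))))
      = (fun (d : PySem.Dict Int (List Int)) (k : Nat) =>
        d.insert ((1 : Int) + (k : Int))
          (PySem.List.slice cs (some ((k : Int) * 3)) (some ((k : Int) * 3 + 3)))) := by
    funext d k
    ring_nf
  rw [hbody]
  exact aaFold_eq (cs.length / 3) cs PySem.Dict.empty 1 rfl

-- total number of genomic positions = the sum Pre_ bounds
theorem length_flat_ranges (coords : List (Int × Int)) (rev : Bool) :
    (coords.flatMap (fun p => if rev then PySem.List.pyRange p.2 (p.1 - 1) (-1)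
                              else PySem.List.pyRange p.1 (p.2 + 1) 1)).length
      = (coords.map (fun p => (p.2 - p.1 + 1).toNat)).sum := by
  rw [List.length_flatMap]
  congr 1
  apply List.map_congr_left
  intro p _
  cases rev with
  | false => simp [PySem.List.length_pyRange_one]; omega
  | true => simp [PySem.List.length_pyRange_neg_one]; omega

-- the fused loop's two dicts, within Pre_
theorem core_eq (coords : List (Int × Int)) (nt : List Char) (rev : Bool)
    (hlen : (coords.map (fun p => (p.2 - p.1 + 1).toNat)).sum ≤ nt.length) :
    (bgcOuter nt rev coords PySem.Dict.empty PySem.Dict.empty 0 [] 1).1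
        = posF nt PySem.Dict.empty 0
            (coords.flatMap (fun p => if rev then PySem.List.pyRange p.2 (p.1 - 1) (-1)
                                      else PySem.List.pyRange p.1 (p.2 + 1) 1)) ∧
    (bgcOuter nt rev coords PySem.Dict.empty PySem.Dict.empty 0 [] 1).2.1
        = (codAcc PySem.Dict.empty 1 []
            (coords.flatMap (fun p => if rev then PySem.List.pyRange p.2 (p.1 - 1) (-1)
                                      else PySem.List.pyRange p.1 (p.2 + 1) 1))).1 := by
  rw [bgcOuter_eq]
  rw [bgcGo_spec nt _ _ _ _ _ _ le_rfl
    (by rw [length_flat_ranges]; omega)]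
  exact ⟨rfl, rfl⟩

-- ===== VERDICT (by name: the statement is the Claim_ definition above) =====
theorem build_genomic_to_cds_mapping_spec : Claim_equal_build_genomic_to_cds_mapping := by
  intro coords strand nt_seq _ hpre
  unfold Pre_build_genomic_to_cds_mapping at hpre
  unfold Spec_build_genomic_to_cds_mapping build_genomic_to_cds_mapping build_genomic_to_cds_mapping_alt
  by_cases hc : strand = "-" ∨ strand = "-1"
  · have hrev : (strand == "-" || strand == "-1") = true := by
      rcases hc with rfl | rfl <;> rfl
    simp only [if_pos hc, hrev]
    obtain ⟨h1, h2⟩ := core_eq coords nt_seq.toList true hpre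
    simp only [reduceIte] at h1 h2
    rw [h1, h2, foldl_append_flat, List.nil_append, aaA_eq]
    rfl
  · have hrev : (strand == "-" || strand == "-1") = false := by
      simp only [not_or] at hc
      simp [hc.1, hc.2]
    simp only [if_neg hc, hrev]
    obtain ⟨h1, h2⟩ := core_eq coords nt_seq.toList false hpre
    simp only [Bool.false_eq_true, if_false] at h1 h2 ⊢
    rw [h1, h2, foldl_append_flat, List.nil_append, aaA_eq]
    rfl
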